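-- pv_equiv track=rewrite | github.com/blueroutecn/Algorithm | Divide_and_Conquer/QUADTREE.py | FlipTree
-- ===== SOURCE A (Python) =====
-- def FlipTree(fw,tree,idx):
--     """
--     0. input idx: 문제의 시작
--     0. tree[idx] != 'x'이면 문제 종료
--     0. idx가 tree 길이 넘는지 체크 필요없음
--     1. 첫번째 부분 문제의 시작 인덱스를 찾는다.
--     2. 시작 인덱스 이후의 문자열을 재귀로 돌린다
--     3. 해당 문제의 끝 인덱스를 리턴 받는다
--     4. 다음 인덱스에 대해서 재귀를 돌린다
--     5. 4번 반복하면 문제가 끝나있다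
--     """
--     """
--     * Flip Tree 의 시간 복잡도는?
--     """
--
--     if tree[idx] != 'x':
--         #fw.write('{}'.format(tree[idx]))
--         return (idx + 1),tree[idx]
--     #fw.write('{}'.format(tree[idx]))
--
--     fliplist = {}
--     idx = idx + 1
--     for i in range(0,4):
--         idx,fliped = FlipTree(fw,tree,idx)
--         fliplist[i] = fliped
--
--     fliped = fliplist[2] + fliplist[3] + fliplist[0] + fliplist[1]
--     fliped = 'x' + fliped
--     return idx,fliped
-- ===== SOURCE B (Python) =====
-- def FlipTree(fw, tree, idx):
--     # Iterative reformulation: a single loop over the characters with an explicit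
--     # stack of partially-filled child lists; a completed subtree string bubbles up,
--     # full frames pop and combine their four children in flipped order 2,3,0,1.
--     i = idx
--     stack = []
--     while True:
--         c = tree[i]
--         i += 1
--         if c == 'x':
--             stack.append([])
--             continue
--         done = c
--         while True:
--             if not stack:
--                 return i, done
--             top = stack[-1]
--             top.append(done)
--             if len(top) < 4:
--                 break
--             stack.pop()
--             a, b, c2, d = top
--             done = 'x' + c2 + d + a + b
-- ===== Notes on version B (the rewrite author's own statement) =====
-- stated objective: alternative
-- what changed: A flips by four nested recursive calls that concatenate while parsing; B is a single non-recursive loop over the characters with an explicit stack of partially-filled child lists, combining each completed frame's four children in flipped order 2,3,0,1.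
import Mathlib
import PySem

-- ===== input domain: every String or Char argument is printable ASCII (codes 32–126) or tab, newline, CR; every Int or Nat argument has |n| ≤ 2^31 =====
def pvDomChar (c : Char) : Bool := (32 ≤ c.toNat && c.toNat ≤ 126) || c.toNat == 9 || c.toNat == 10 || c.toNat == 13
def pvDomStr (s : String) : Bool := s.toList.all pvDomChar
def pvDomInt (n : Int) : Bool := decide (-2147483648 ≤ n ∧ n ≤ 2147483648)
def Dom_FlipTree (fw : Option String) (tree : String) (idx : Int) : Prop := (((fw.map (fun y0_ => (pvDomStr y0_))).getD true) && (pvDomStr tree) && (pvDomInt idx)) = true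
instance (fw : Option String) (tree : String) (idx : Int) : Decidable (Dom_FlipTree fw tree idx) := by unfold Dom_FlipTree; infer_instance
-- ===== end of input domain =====

-- B replaces A's recursive flip-while-parsing with a single iterative loop over the characters
-- driven by an explicit stack of partially-filled child lists (alternative decomposition, no speed claim).


-- ===== PORT A =====
-- A's recursion as written: read tree[idx]; a non-'x' char is a leaf; otherwise run four
-- sequential recursive calls threading idx and concatenate the pieces in order 2,3,0,1 after 'x'.
-- Fuel (2*len+1 at top level) only makes the recursion total; it suffices whenever Python returns.
def pvFlipAuxA (tree : List Char) : Nat → Int → Option (Int × String)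
  | 0, _ => none
  | fuel+1, idx =>
    match PySem.List.pyGet? tree idx with
    | none => none
    | some c =>
      if c ≠ 'x' then some (idx + 1, String.mk [c])
      else
        match pvFlipAuxA tree fuel (idx + 1) with
        | none => none
        | some (i1, f0) =>
          match pvFlipAuxA tree fuel i1 with
          | none => none
          | some (i2, f1) =>
            match pvFlipAuxA tree fuel i2 with
            | none => none
            | some (i3, f2) =>
              match pvFlipAuxA tree fuel i3 with
              | none => none
              | some (i4, f3) => some (i4, "x" ++ (f2 ++ f3 ++ f0 ++ f1))

def FlipTree (fw : Option String) (tree : String) (idx : Int) : Int × String :=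
  match pvFlipAuxA tree.toList (2 * tree.toList.length + 1) idx with
  | some r => r
  | none => (0, "")

-- ===== PORT B =====
-- Source B's inner while-loop: push a completed subtree string onto the stack; a frame that has
-- received its 4 children pops and combines them in flipped order 2,3,0,1 behind an 'x';
-- an empty stack means the completed string is the whole answer.
def pvClose : List (List String) → String → (List (List String)) ⊕ String
  | [], done => Sum.inr done
  | [a, b, c] :: rest, done => pvClose rest ("x" ++ c ++ done ++ a ++ b)
  | top :: rest, done => Sum.inl ((top ++ [done]) :: rest)

-- Source B's outer loop: one character per step ('x' pushes an empty frame, anything else is a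
-- completed leaf fed to pvClose); fuel = number of iterations, 2*len+1 covers every terminating run.
def pvRunB (tree : List Char) : Nat → Int → List (List String) → Option (Int × String)
  | 0, _, _ => none
  | fuel+1, i, stack =>
    match PySem.List.pyGet? tree i with
    | none => none
    | some c =>
      if c = 'x' then pvRunB tree fuel (i + 1) ([] :: stack)
      else
        match pvClose stack (String.mk [c]) with
        | Sum.inr s => some (i + 1, s)
        | Sum.inl st => pvRunB tree fuel (i + 1) st

def FlipTree_alt (fw : Option String) (tree : String) (idx : Int) : Int × String :=
  match pvRunB tree.toList (2 * tree.toList.length + 1) idx [] with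
  | some r => r
  | none => (0, "")

-- ===== PRECONDITION & SPEC =====
-- The running "number of subtrees still needed" after reading positions idx..k-1:
-- starts at 1; an 'x' adds 3, any other character subtracts 1.
def pvNeed (tree : List Char) (idx k : Int) : Int :=
  1 + ((PySem.List.pyRange idx k 1).map
        (fun i => if (PySem.List.pyGet? tree i).getD 'a' = 'x' then (3 : Int) else -1)).sum

-- Pre_ excludes exactly the inputs where Python A raises IndexError: the parse starting at idx
-- must be completable within the string, i.e. the need-counter reaches 0 at some k ≤ len,
-- and idx must not be below -len.
def Pre_FlipTree (fw : Option String) (tree : String) (idx : Int) : Prop :=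
  -(tree.toList.length : Int) ≤ idx ∧
    ∃ k ∈ PySem.List.pyRange idx ((tree.toList.length : Int) + 1) 1, pvNeed tree.toList idx k = 0

instance (fw : Option String) (tree : String) (idx : Int) : Decidable (Pre_FlipTree fw tree idx) := by
  unfold Pre_FlipTree; infer_instance

def pvWitness_FlipTree : Option String × String × Int := (none, "xabxcdefg", 0)

def Spec_FlipTree (fw : Option String) (tree : String) (idx : Int) (out : Int × String) : Prop := out = FlipTree_alt fw tree idx
instance (fw : Option String) (tree : String) (idx : Int) (out : Int × String) : Decidable (Spec_FlipTree fw tree idx out) := by unfold Spec_FlipTree; infer_instance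

-- ===== CLAIM (what is proved, stated in full; the proofs are below) =====
def Claim_equal_FlipTree : Prop := ∀ (fw : Option String) (tree : String) (idx : Int), Dom_FlipTree fw tree idx → Pre_FlipTree fw tree idx → Spec_FlipTree fw tree idx (FlipTree fw tree idx)

-- ===== LEMMAS AND PROOFS =====

-- What remains to be done after pvClose has absorbed a completed subtree string s parsed up to
-- index e: either the whole answer is known (empty stack) or the loop continues with fuel n.
def pvResume (tree : List Char) (e : Int) (stack : List (List String)) (s : String) (n : Nat) (r : Int × String) : Prop :=
  match pvClose stack s with
  | Sum.inr t => r = (e, t)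
  | Sum.inl st' => pvRunB tree n e st' = some r

theorem pv_index_bounds {tree : List Char} {i : Int} {c : Char}
    (h : PySem.List.pyGet? tree i = some c) : -(tree.length : Int) ≤ i ∧ i < tree.length := by
  by_contra hcon
  have : PySem.List.pyGet? tree i = none := by
    rw [PySem.List.pyGet?_eq_none_iff]
    simp only [PySem.Raise.InRange]
    omega
  rw [this] at h; simp at h

theorem pv_aux_bounds (tree : List Char) : ∀ (f : Nat) (i e : Int) (s : String),
    pvFlipAuxA tree f i = some (e, s) → -(tree.length : Int) ≤ i ∧ i < e ∧ e ≤ tree.length := by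
  intro f
  induction f with
  | zero => intro i e s h; exact absurd h (by simp [pvFlipAuxA])
  | succ f ih =>
    intro i e s h
    rw [pvFlipAuxA] at h
    cases hg : PySem.List.pyGet? tree i with
    | none => rw [hg] at h; simp at h
    | some c =>
      rw [hg] at h
      have hib := pv_index_bounds hg
      by_cases hc : c = 'x'
      · simp only [hc, ne_eq, not_true_eq_false, if_false] at h
        cases h1 : pvFlipAuxA tree f (i + 1) with
        | none => rw [h1] at h; simp at h
        | some p1 =>
          obtain ⟨i1, f0⟩ := p1; rw [h1] at h; dsimp only at h
          cases h2 : pvFlipAuxA tree f i1 with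
          | none => rw [h2] at h; simp at h
          | some p2 =>
            obtain ⟨i2, f1⟩ := p2; rw [h2] at h; dsimp only at h
            cases h3 : pvFlipAuxA tree f i2 with
            | none => rw [h3] at h; simp at h
            | some p3 =>
              obtain ⟨i3, f2⟩ := p3; rw [h3] at h; dsimp only at h
              cases h4 : pvFlipAuxA tree f i3 with
              | none => rw [h4] at h; simp at h
              | some p4 =>
                obtain ⟨i4, f3⟩ := p4; rw [h4] at h; dsimp only at h
                simp only [Option.some.injEq, Prod.mk.injEq] at h
                obtain ⟨he, _⟩ := h
                have b1 := ih _ _ _ h1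
                have b2 := ih _ _ _ h2
                have b3 := ih _ _ _ h3
                have b4 := ih _ _ _ h4
                subst he
                omega
      · simp only [hc, ne_eq, not_false_eq_true, if_true, Option.some.injEq, Prod.mk.injEq] at h
        obtain ⟨he, _⟩ := h
        omega

theorem pv_aux_mono (tree : List Char) : ∀ (f : Nat) (i : Int) (r : Int × String),
    pvFlipAuxA tree f i = some r → pvFlipAuxA tree (f + 1) i = some r := by
  intro f
  induction f with
  | zero => intro i r h; exact absurd h (by simp [pvFlipAuxA])
  | succ f ih =>
    intro i r h
    rw [pvFlipAuxA] at h
    rw [pvFlipAuxA]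
    cases hg : PySem.List.pyGet? tree i with
    | none => rw [hg] at h; simp at h
    | some c =>
      rw [hg] at h
      by_cases hc : c = 'x'
      · simp only [hc, ne_eq, not_true_eq_false, if_false] at h ⊢
        cases h1 : pvFlipAuxA tree f (i + 1) with
        | none => rw [h1] at h; simp at h
        | some p1 =>
          obtain ⟨i1, f0⟩ := p1; rw [h1] at h; dsimp only at h; rw [ih _ _ h1]; dsimp only
          cases h2 : pvFlipAuxA tree f i1 with
          | none => rw [h2] at h; simp at h
          | some p2 =>
            obtain ⟨i2, f1⟩ := p2; rw [h2] at h; dsimp only at h; rw [ih _ _ h2]; dsimp only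
            cases h3 : pvFlipAuxA tree f i2 with
            | none => rw [h3] at h; simp at h
            | some p3 =>
              obtain ⟨i3, f2⟩ := p3; rw [h3] at h; dsimp only at h; rw [ih _ _ h3]; dsimp only
              cases h4 : pvFlipAuxA tree f i3 with
              | none => rw [h4] at h; simp at h
              | some p4 =>
                obtain ⟨i4, f3⟩ := p4; rw [h4] at h; dsimp only at h; rw [ih _ _ h4]; dsimp only
                exact h
      · simp only [hc, ne_eq, not_false_eq_true, if_true] at h ⊢
        exact h

theorem pv_aux_mono_le (tree : List Char) {f g : Nat} (hfg : f ≤ g) :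
    ∀ {i : Int} {r : Int × String}, pvFlipAuxA tree f i = some r → pvFlipAuxA tree g i = some r := by
  induction hfg with
  | refl => intro i r h; exact h
  | step _ ih => intro i r h; exact pv_aux_mono tree _ _ _ (ih h)

theorem pv_runB_mono (tree : List Char) : ∀ (n : Nat) (i : Int) (stack : List (List String)) (r : Int × String),
    pvRunB tree n i stack = some r → pvRunB tree (n + 1) i stack = some r := by
  intro n
  induction n with
  | zero => intro i st r h; exact absurd h (by simp [pvRunB])
  | succ n ih =>
    intro i st r h
    rw [pvRunB] at h
    rw [pvRunB]
    cases hg : PySem.List.pyGet? tree i with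
    | none => rw [hg] at h; simp at h
    | some c =>
      rw [hg] at h
      by_cases hc : c = 'x'
      · simp only [hc, if_true] at h ⊢
        exact ih _ _ _ h
      · simp only [hc, if_false] at h ⊢
        cases hcl : pvClose st (String.mk [c]) with
        | inr s => rw [hcl] at h; exact h
        | inl st' => rw [hcl] at h; exact ih _ _ _ h

theorem pv_runB_mono_le (tree : List Char) {f g : Nat} (hfg : f ≤ g) :
    ∀ {i : Int} {stack : List (List String)} {r : Int × String},
    pvRunB tree f i stack = some r → pvRunB tree g i stack = some r := by
  induction hfg with
  | refl => intro i st r h; exact h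
  | step _ ih => intro i st r h; exact pv_runB_mono tree _ _ _ _ (ih h)

theorem pv_forward (tree : List Char) : ∀ (f : Nat) (i e : Int) (s : String),
    pvFlipAuxA tree f i = some (e, s) → ∀ (stack : List (List String)) (n : Nat) (r : Int × String),
    pvResume tree e stack s n r → pvRunB tree ((e - i).toNat + n) i stack = some r := by
  intro f
  induction f with
  | zero => intro i e s h; exact absurd h (by simp [pvFlipAuxA])
  | succ f ih =>
    intro i e s h stack n r hres
    rw [pvFlipAuxA] at h
    cases hg : PySem.List.pyGet? tree i with
    | none => rw [hg] at h; simp at h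
    | some c =>
      rw [hg] at h
      by_cases hc : c = 'x'
      · simp only [hc, ne_eq, not_true_eq_false, if_false] at h
        cases h1 : pvFlipAuxA tree f (i + 1) with
        | none => rw [h1] at h; simp at h
        | some p1 =>
          obtain ⟨i1, f0⟩ := p1; rw [h1] at h; dsimp only at h
          cases h2 : pvFlipAuxA tree f i1 with
          | none => rw [h2] at h; simp at h
          | some p2 =>
            obtain ⟨i2, f1⟩ := p2; rw [h2] at h; dsimp only at h
            cases h3 : pvFlipAuxA tree f i2 with
            | none => rw [h3] at h; simp at h
            | some p3 =>
              obtain ⟨i3, f2⟩ := p3; rw [h3] at h; dsimp only at h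
              cases h4 : pvFlipAuxA tree f i3 with
              | none => rw [h4] at h; simp at h
              | some p4 =>
                obtain ⟨i4, f3⟩ := p4; rw [h4] at h; dsimp only at h
                simp only [Option.some.injEq, Prod.mk.injEq] at h
                obtain ⟨he, hs⟩ := h
                subst he; subst hs
                have b1 := pv_aux_bounds tree _ _ _ _ h1
                have b2 := pv_aux_bounds tree _ _ _ _ h2
                have b3 := pv_aux_bounds tree _ _ _ _ h3
                have b4 := pv_aux_bounds tree _ _ _ _ h4
                -- resume after the fourth child at frame [f0,f1,f2] is the outer resume
                have hres4 : pvResume tree i4 ([f0, f1, f2] :: stack) f3 n r := by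
                  unfold pvResume at hres ⊢
                  have hcl : pvClose ([f0, f1, f2] :: stack) f3
                      = pvClose stack ("x" ++ f2 ++ f3 ++ f0 ++ f1) := rfl
                  rw [hcl]
                  have : "x" ++ f2 ++ f3 ++ f0 ++ f1 = "x" ++ (f2 ++ f3 ++ f0 ++ f1) := by
                    simp [String.append_assoc]
                  rw [this]
                  exact hres
                have step4 := ih _ _ _ h4 ([f0, f1, f2] :: stack) n r hres4
                have hres3 : pvResume tree i3 ([f0, f1] :: stack) f2 ((i4 - i3).toNat + n) r := by
                  unfold pvResume
                  exact step4
                have step3 := ih _ _ _ h3 ([f0, f1] :: stack) _ r hres3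
                have hres2 : pvResume tree i2 ([f0] :: stack) f1 ((i3 - i2).toNat + ((i4 - i3).toNat + n)) r := by
                  unfold pvResume
                  exact step3
                have step2 := ih _ _ _ h2 ([f0] :: stack) _ r hres2
                have hres1 : pvResume tree i1 ([] :: stack) f0 ((i2 - i1).toNat + ((i3 - i2).toNat + ((i4 - i3).toNat + n))) r := by
                  unfold pvResume
                  exact step2
                have step1 := ih _ _ _ h1 ([] :: stack) _ r hres1
                have hfuel : (i4 - i).toNat + n
                    = ((i1 - (i + 1)).toNat + ((i2 - i1).toNat + ((i3 - i2).toNat + ((i4 - i3).toNat + n)))) + 1 := by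
                  omega
                rw [hfuel, pvRunB, hg]
                simp only [hc, if_true]
                exact step1
      · simp only [hc, ne_eq, not_false_eq_true, if_true, Option.some.injEq, Prod.mk.injEq] at h
        obtain ⟨he, hs⟩ := h
        subst he; subst hs
        have hfuel : ((i + 1) - i).toNat + n = n + 1 := by omega
        rw [hfuel, pvRunB, hg]
        simp only [hc, if_false]
        unfold pvResume at hres
        cases hcl : pvClose stack (String.mk [c]) with
        | inr t =>
          rw [hcl] at hres
          rw [show r = (i + 1, t) from hres]
        | inl st' =>
          rw [hcl] at hres
          exact hres

theorem pv_backward (tree : List Char) : ∀ (n : Nat) (i : Int) (stack : List (List String)) (r : Int × String),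
    pvRunB tree n i stack = some r →
    ∃ e s m, pvFlipAuxA tree n i = some (e, s) ∧ m < n ∧ pvResume tree e stack s m r := by
  intro n
  induction n using Nat.strong_induction_on with
  | _ n ih =>
    match n with
    | 0 => intro i stack r h; simp [pvRunB] at h
    | Nat.succ n =>
      intro i stack r h
      rw [pvRunB] at h
      cases hg : PySem.List.pyGet? tree i with
      | none => rw [hg] at h; simp at h
      | some c =>
        rw [hg] at h; dsimp only at h
        by_cases hc : c = 'x'
        · simp only [hc, if_true] at h
          obtain ⟨e1, s1, m1, ha1, hm1, hr1⟩ := ih n (Nat.lt_succ_self n) (i + 1) ([] :: stack) r h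
          have hr1' : pvRunB tree m1 e1 ([s1] :: stack) = some r := hr1
          obtain ⟨e2, s2, m2, ha2, hm2, hr2⟩ := ih m1 (by omega) e1 ([s1] :: stack) r hr1'
          have hr2' : pvRunB tree m2 e2 ([s1, s2] :: stack) = some r := hr2
          obtain ⟨e3, s3, m3, ha3, hm3, hr3⟩ := ih m2 (by omega) e2 ([s1, s2] :: stack) r hr2'
          have hr3' : pvRunB tree m3 e3 ([s1, s2, s3] :: stack) = some r := hr3
          obtain ⟨e4, s4, m4, ha4, hm4, hr4⟩ := ih m3 (by omega) e3 ([s1, s2, s3] :: stack) r hr3'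
          refine ⟨e4, "x" ++ (s3 ++ s4 ++ s1 ++ s2), m4, ?_, by omega, ?_⟩
          · rw [pvFlipAuxA, hg]
            simp only [hc, ne_eq, not_true_eq_false, if_false]
            rw [ha1]; dsimp only
            rw [pv_aux_mono_le tree (by omega : m1 ≤ n) ha2]; dsimp only
            rw [pv_aux_mono_le tree (by omega : m2 ≤ n) ha3]; dsimp only
            rw [pv_aux_mono_le tree (by omega : m3 ≤ n) ha4]
          · unfold pvResume at hr4 ⊢
            have hcl : pvClose ([s1, s2, s3] :: stack) s4
                = pvClose stack ("x" ++ s3 ++ s4 ++ s1 ++ s2) := rfl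
            rw [hcl] at hr4
            have hs : "x" ++ s3 ++ s4 ++ s1 ++ s2 = "x" ++ (s3 ++ s4 ++ s1 ++ s2) := by
              simp [String.append_assoc]
            rw [hs] at hr4
            exact hr4
        · simp only [hc, if_false] at h
          cases hcl : pvClose stack (String.mk [c]) with
          | inr s =>
            rw [hcl] at h
            refine ⟨i + 1, String.mk [c], 0, ?_, Nat.succ_pos n, ?_⟩
            · rw [pvFlipAuxA, hg]
              simp only [hc, ne_eq, not_false_eq_true, if_true]
            · unfold pvResume
              rw [hcl]
              exact (Option.some.inj (h : some (i + 1, s) = some r)).symm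
          | inl st' =>
            rw [hcl] at h
            refine ⟨i + 1, String.mk [c], n, ?_, Nat.lt_succ_self n, ?_⟩
            · rw [pvFlipAuxA, hg]
              simp only [hc, ne_eq, not_false_eq_true, if_true]
            · unfold pvResume
              rw [hcl]
              exact h

-- ===== VERDICT (by name: the statement is the Claim_ definition above) =====
theorem FlipTree_spec : Claim_equal_FlipTree := by
  intro fw tree idx hdom hpre
  unfold Spec_FlipTree FlipTree FlipTree_alt
  cases hB : pvRunB tree.toList (2 * tree.toList.length + 1) idx [] with
  | some r =>
    obtain ⟨e, s, m, hA, hm, hres⟩ := pv_backward tree.toList _ idx [] r hB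
    rw [hA]
    rw [show r = (e, s) from hres]
  | none =>
    cases hA : pvFlipAuxA tree.toList (2 * tree.toList.length + 1) idx with
    | none => rfl
    | some p =>
      obtain ⟨e, s⟩ := p
      exfalso
      have hb := pv_aux_bounds tree.toList _ _ _ _ hA
      have hres : pvResume tree.toList e [] s 0 (e, s) := rfl
      have hrun := pv_forward tree.toList _ _ _ _ hA [] 0 (e, s) hres
      have hN : pvRunB tree.toList (2 * tree.toList.length + 1) idx [] = some (e, s) :=
        pv_runB_mono_le tree.toList (by omega) hrun
      rw [hB] at hN
      simp at hN
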